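-- pv_equiv track=rewrite | github.com/kylrth/ParaMA | evaluation.py | get_seg_morphemes
-- ===== SOURCE A (Python) =====
-- def get_seg_morphemes(seg):
--     """Return a list of tuples where each tuple contains the starting and ending indices for a morpheme."""
--     seg_morphemes = []
--     sIndx = 0
--     for i in range(len(seg)):
--         # get index of the end of this morpheme by adding its length to the starting index
--         eIndx = sIndx + len(seg[i])
--         seg_morphemes.append((sIndx, eIndx))
--         sIndx = eIndx  # the end of this morpheme is the start of the next
--     return seg_morphemes
-- ===== SOURCE B (Python) =====
-- def get_seg_morphemes(seg):
--     """Return a list of tuples where each tuple contains the starting and ending indices for a morpheme."""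
--     def solve(lo, hi):
--         # return (index tuples relative to 0, total length of seg[lo:hi])
--         if hi - lo == 0:
--             return [], 0
--         if hi - lo == 1:
--             n = len(seg[lo])
--             return [(0, n)], n
--         mid = (lo + hi) // 2
--         left, nl = solve(lo, mid)
--         right, nr = solve(mid, hi)
--         return left + [(a + nl, b + nl) for (a, b) in right], nl + nr
--     return solve(0, len(seg))[0]
-- ===== Notes on version B (the rewrite author's own statement) =====
-- stated objective: alternative
-- what changed: B computes the spans by divide and conquer: it recursively solves the two halves of the segment list relative to offset 0 and merges by shifting the right half's tuples by the left half's total length, instead of threading a running start index left-to-right.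
import Mathlib
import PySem

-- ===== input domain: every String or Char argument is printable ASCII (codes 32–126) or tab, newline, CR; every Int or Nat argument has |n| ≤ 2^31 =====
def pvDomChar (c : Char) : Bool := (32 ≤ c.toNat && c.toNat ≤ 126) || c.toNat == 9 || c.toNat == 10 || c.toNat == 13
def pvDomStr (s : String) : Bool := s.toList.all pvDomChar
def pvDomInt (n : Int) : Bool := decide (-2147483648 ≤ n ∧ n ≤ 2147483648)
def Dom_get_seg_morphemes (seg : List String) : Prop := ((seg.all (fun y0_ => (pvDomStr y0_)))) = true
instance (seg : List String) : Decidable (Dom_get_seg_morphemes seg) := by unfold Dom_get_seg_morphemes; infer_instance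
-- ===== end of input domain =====

-- B computes the spans by divide and conquer (solve halves at offset 0, shift the right half by
-- the left half's total length) instead of threading a running start index (alternative algorithm).


-- ===== PORT A =====
-- for i in range(len(seg)): eIndx = sIndx + len(seg[i]); append (sIndx, eIndx); sIndx = eIndx
def get_seg_morphemes (seg : List String) : List (Int × Int) :=
  let st := (PySem.List.pyRange 0 (PySem.List.len seg) 1).foldl
    (fun (st : List (Int × Int) × Int) i =>
      let eIndx := st.2 + PySem.Str.len (PySem.List.pyGetD seg i "")
      (st.1 ++ [(st.2, eIndx)], eIndx)) ([], 0)
  st.1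

-- ===== PORT B =====
-- solve(lo, hi) on seg[lo:hi], ported as a function of the sublist itself:
-- base cases for 0 and 1 segments; otherwise split at mid = len//2 (Python's (lo+hi)//2 relative
-- to lo), solve both halves, and append the right half's tuples shifted by the left's total length.
def pvSolve : List String → List (Int × Int) × Int
  | [] => ([], 0)
  | [x] => ([(0, PySem.Str.len x)], PySem.Str.len x)
  | x1 :: x2 :: rest =>
    let xs := x1 :: x2 :: rest
    let mid := xs.length / 2
    let L := pvSolve (xs.take mid)
    let R := pvSolve (xs.drop mid)
    (L.1 ++ R.1.map (fun p => (p.1 + L.2, p.2 + L.2)), L.2 + R.2)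
termination_by xs => xs.length
decreasing_by
  · simp [List.length_take]; omega
  · simp [List.length_drop]; omega

def get_seg_morphemes_alt (seg : List String) : List (Int × Int) :=
  (pvSolve seg).1

-- ===== PRECONDITION & SPEC =====
def Spec_get_seg_morphemes (seg : List String) (out : List (Int × Int)) : Prop := out = get_seg_morphemes_alt seg
instance (seg : List String) (out : List (Int × Int)) : Decidable (Spec_get_seg_morphemes seg out) := by unfold Spec_get_seg_morphemes; infer_instance

-- ===== CLAIM (what is proved, stated in full; the proofs are below) =====
def Claim_equal_get_seg_morphemes : Prop := ∀ (seg : List String), Dom_get_seg_morphemes seg → Spec_get_seg_morphemes seg (get_seg_morphemes seg)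

-- ===== LEMMAS AND PROOFS =====

-- reference recursion: the segment list paired with a running start index
def pvGo (s : Int) : List String → List (Int × Int)
  | [] => []
  | x :: xs => (s, s + PySem.Str.len x) :: pvGo (s + PySem.Str.len x) xs

def pvSumLen (xs : List String) : Int := (xs.map PySem.Str.len).sum

theorem pvA_foldl (seg : List String) : ∀ (acc : List (Int × Int)) (s : Int),
    (seg.foldl (fun (st : List (Int × Int) × Int) x =>
      (st.1 ++ [(st.2, st.2 + PySem.Str.len x)], st.2 + PySem.Str.len x)) (acc, s)).1
      = acc ++ pvGo s seg := by
  induction seg with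
  | nil => intro acc s; simp [pvGo]
  | cons x xs ih =>
      intro acc s
      simp only [List.foldl_cons, pvGo]
      rw [ih]
      simp

theorem pvGo_shift (xs : List String) : ∀ (s : Int),
    pvGo s xs = (pvGo 0 xs).map (fun p => (p.1 + s, p.2 + s)) := by
  induction xs with
  | nil => intro s; simp [pvGo]
  | cons x t ih =>
      intro s
      simp only [pvGo, List.map_cons]
      rw [ih (s + PySem.Str.len x), ih (0 + PySem.Str.len x)]
      simp only [List.map_map]
      congr 1
      · simp only [Prod.mk.injEq]; omega
      · apply List.map_congr_left; intro p _
        simp only [Function.comp_apply, Prod.mk.injEq]; omega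

theorem pvGo_append (l r : List String) : ∀ (s : Int),
    pvGo s (l ++ r) = pvGo s l ++ pvGo (s + pvSumLen l) r := by
  induction l with
  | nil => intro s; simp [pvGo, pvSumLen]
  | cons x t ih =>
      intro s
      simp only [List.cons_append, pvGo, ih]
      have : s + PySem.Str.len x + pvSumLen t = s + pvSumLen (x :: t) := by
        simp [pvSumLen]; ring
      rw [this]

theorem pvSolve_eq (xs : List String) : pvSolve xs = (pvGo 0 xs, pvSumLen xs) := by
  fun_induction pvSolve xs with
  | case1 => simp [pvGo, pvSumLen]
  | case2 x => simp [pvGo, pvSumLen]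
  | case3 x1 x2 rest xs mid L R ih1 ih2 =>
      have hsplit : x1 :: x2 :: rest = xs.take mid ++ xs.drop mid := (List.take_append_drop mid xs).symm
      simp only [L, R, ih1, ih2, Prod.mk.injEq]
      refine ⟨?_, ?_⟩
      · conv_rhs => rw [hsplit]
        rw [pvGo_append]
        congr 1
        rw [pvGo_shift (xs.drop mid) (0 + pvSumLen (xs.take mid))]
        simp
      · conv_rhs => rw [hsplit]
        simp [pvSumLen]

-- ===== VERDICT (by name: the statement is the Claim_ definition above) =====
theorem get_seg_morphemes_spec : Claim_equal_get_seg_morphemes := by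
  unfold Claim_equal_get_seg_morphemes
  intro seg _
  show get_seg_morphemes seg = get_seg_morphemes_alt seg
  unfold get_seg_morphemes get_seg_morphemes_alt
  rw [pvSolve_eq]
  have hA : (PySem.List.pyRange 0 (PySem.List.len seg) 1).foldl
      (fun (st : List (Int × Int) × Int) i =>
        let eIndx := st.2 + PySem.Str.len (PySem.List.pyGetD seg i "")
        (st.1 ++ [(st.2, eIndx)], eIndx)) ([], 0)
      = seg.foldl (fun (st : List (Int × Int) × Int) x =>
        (st.1 ++ [(st.2, st.2 + PySem.Str.len x)], st.2 + PySem.Str.len x)) ([], 0) := by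
    exact PySem.List.foldl_pyRange_zero_pyGetD seg ""
      (fun (st : List (Int × Int) × Int) x =>
        (st.1 ++ [(st.2, st.2 + PySem.Str.len x)], st.2 + PySem.Str.len x)) ([], 0)
  simp only [hA, pvA_foldl seg [] 0, List.nil_append]
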